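-- pv_equiv track=rewrite | github.com/RiyaaGupta02/ShakeMaker_game | backend/main.py | _categorize_ingredients
-- ===== SOURCE A (Python) =====
-- from typing import List, Dict, Optional
--
-- def _categorize_ingredients(ingredients: List[str]) -> Dict:
--     """Categorize ingredients by type"""
--     categories = {'fruits': [], 'vegetables': [], 'cakes': [], 'syrups': []}
--
--     category_map = {
--         # Fruits
--         'apple': 'fruits', 'banana': 'fruits', 'strawberry': 'fruits',
--         'mango': 'fruits', 'blueberry': 'fruits', 'pineapple': 'fruits',
--         'watermelon': 'fruits', 'peach': 'fruits', 'cherry': 'fruits',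
--         'coconut': 'fruits', 'avocado': 'fruits',
--
--         # Vegetables
--         'spinach': 'vegetables', 'carrot': 'vegetables', 'beetroot': 'vegetables',
--         'kale': 'vegetables', 'celery': 'vegetables', 'cauliflower': 'vegetables',
--         'sweet_potato': 'vegetables', 'pumpkin': 'vegetables', 'parsley': 'vegetables',
--         'mint': 'vegetables',
--
--         # Cakes
--         'chocolate': 'cakes', 'vanilla': 'cakes', 'red_velvet': 'cakes',
--         'cheesecake': 'cakes', 'lemon': 'cakes', 'strawberry_cake': 'cakes',
--         'tiramisu': 'cakes', 'black_forest': 'cakes', 'coconut_cake': 'cakes',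
--
--         # Syrups
--         'honey': 'syrups', 'maple': 'syrups', 'chocolate_syrup': 'syrups',
--         'caramel': 'syrups', 'vanilla_syrup': 'syrups', 'strawberry_syrup': 'syrups'
--     }
--
--     for ingredient in ingredients:
--         category = category_map.get(ingredient)
--         if category and category in categories:
--             categories[category].append(ingredient)
--
--     return categories
-- ===== SOURCE B (Python) =====
-- from typing import List, Dict
--
-- def _categorize_ingredients(ingredients: List[str]) -> Dict:
--     """Categorize ingredients by type"""
--     members = {
--         'fruits': ('apple', 'banana', 'strawberry', 'mango', 'blueberry',
--                    'pineapple', 'watermelon', 'peach', 'cherry', 'coconut',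
--                    'avocado'),
--         'vegetables': ('spinach', 'carrot', 'beetroot', 'kale', 'celery',
--                        'cauliflower', 'sweet_potato', 'pumpkin', 'parsley',
--                        'mint'),
--         'cakes': ('chocolate', 'vanilla', 'red_velvet', 'cheesecake', 'lemon',
--                   'strawberry_cake', 'tiramisu', 'black_forest', 'coconut_cake'),
--         'syrups': ('honey', 'maple', 'chocolate_syrup', 'caramel',
--                    'vanilla_syrup', 'strawberry_syrup'),
--     }
--     return {cat: [i for i in ingredients if i in items]
--             for cat, items in members.items()}
-- ===== Notes on version B (the rewrite author's own statement) =====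
-- stated objective: simpler
-- what changed: Inverts the data: instead of a single pass appending into a mutable dict via an ingredient-to-category lookup map, B keeps one member tuple per category and builds each of the four lists directly as a membership-filtered pass over the ingredients.
import Mathlib
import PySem

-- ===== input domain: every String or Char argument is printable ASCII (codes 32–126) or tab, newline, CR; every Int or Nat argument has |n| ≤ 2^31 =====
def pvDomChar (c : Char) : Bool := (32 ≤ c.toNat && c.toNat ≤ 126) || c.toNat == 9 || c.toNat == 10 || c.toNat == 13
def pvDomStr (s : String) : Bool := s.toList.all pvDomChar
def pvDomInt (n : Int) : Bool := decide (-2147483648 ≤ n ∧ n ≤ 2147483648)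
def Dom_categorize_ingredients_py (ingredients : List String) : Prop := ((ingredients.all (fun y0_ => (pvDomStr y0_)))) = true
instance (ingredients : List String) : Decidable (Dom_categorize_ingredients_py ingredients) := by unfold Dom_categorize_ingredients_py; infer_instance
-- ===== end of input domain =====

-- B inverts the data: instead of A's single mutating-dict pass driven by an ingredient→category lookup map,
-- B keeps a member list per category and builds each list by a membership filter — simpler decomposition, same results.

-- ===== PORT A =====
-- the category_map dict literal of A
def pvCategoryMap : PySem.Dict String String :=
  PySem.Dict.ofList [("apple", "fruits"),
    ("banana", "fruits"),
    ("strawberry", "fruits"),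
    ("mango", "fruits"),
    ("blueberry", "fruits"),
    ("pineapple", "fruits"),
    ("watermelon", "fruits"),
    ("peach", "fruits"),
    ("cherry", "fruits"),
    ("coconut", "fruits"),
    ("avocado", "fruits"),
    ("spinach", "vegetables"),
    ("carrot", "vegetables"),
    ("beetroot", "vegetables"),
    ("kale", "vegetables"),
    ("celery", "vegetables"),
    ("cauliflower", "vegetables"),
    ("sweet_potato", "vegetables"),
    ("pumpkin", "vegetables"),
    ("parsley", "vegetables"),
    ("mint", "vegetables"),
    ("chocolate", "cakes"),
    ("vanilla", "cakes"),
    ("red_velvet", "cakes"),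
    ("cheesecake", "cakes"),
    ("lemon", "cakes"),
    ("strawberry_cake", "cakes"),
    ("tiramisu", "cakes"),
    ("black_forest", "cakes"),
    ("coconut_cake", "cakes"),
    ("honey", "syrups"),
    ("maple", "syrups"),
    ("chocolate_syrup", "syrups"),
    ("caramel", "syrups"),
    ("vanilla_syrup", "syrups"),
    ("strawberry_syrup", "syrups")]

def categorize_ingredients_py (ingredients : List String) : List (String × List String) :=
  let categories : PySem.Dict String (List String) :=
    PySem.Dict.ofList [("fruits", []), ("vegetables", []), ("cakes", []), ("syrups", [])]
  let final := ingredients.foldl (fun cats ingredient =>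
      match pvCategoryMap.get? ingredient with
      | none => cats
      | some category =>
          if category != "" && cats.contains category then
            cats.modify category [] (fun l => l ++ [ingredient])
          else cats) categories
  final.items

-- ===== PORT B =====
-- B's per-category member tuples (the 'members' dict of Source B, as an association list)
def pvMembers : List (String × List String) :=
  [("fruits", ["apple", "banana", "strawberry", "mango", "blueberry",
               "pineapple", "watermelon", "peach", "cherry", "coconut", "avocado"]),
   ("vegetables", ["spinach", "carrot", "beetroot", "kale", "celery",
                   "cauliflower", "sweet_potato", "pumpkin", "parsley", "mint"]),
   ("cakes", ["chocolate", "vanilla", "red_velvet", "cheesecake", "lemon",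
              "strawberry_cake", "tiramisu", "black_forest", "coconut_cake"]),
   ("syrups", ["honey", "maple", "chocolate_syrup", "caramel",
               "vanilla_syrup", "strawberry_syrup"])]

def categorize_ingredients_py_alt (ingredients : List String) : List (String × List String) :=
  pvMembers.map (fun p => (p.1, ingredients.filter (fun i => p.2.contains i)))

-- ===== PRECONDITION & SPEC =====
def Spec_categorize_ingredients_py (ingredients : List String) (out : List (String × List String)) : Prop := out = categorize_ingredients_py_alt ingredients
instance (ingredients : List String) (out : List (String × List String)) : Decidable (Spec_categorize_ingredients_py ingredients out) := by unfold Spec_categorize_ingredients_py; infer_instance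

-- ===== CLAIM (what is proved, stated in full; the proofs are below) =====
def Claim_equal_categorize_ingredients_py : Prop := ∀ (ingredients : List String), Dom_categorize_ingredients_py ingredients → Spec_categorize_ingredients_py ingredients (categorize_ingredients_py ingredients)

-- ===== LEMMAS AND PROOFS =====
-- every value stored in category_map is one of the four category names
set_option maxRecDepth 8192 in
lemma pvGet?_cases (i cat : String) (h : pvCategoryMap.get? i = some cat) :
    cat = "fruits" ∨ cat = "vegetables" ∨ cat = "cakes" ∨ cat = "syrups" := by
  have hm := PySem.Dict.mem_items_of_get?_eq_some pvCategoryMap h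
  have hv := List.mem_map_of_mem (f := Prod.snd) hm
  rw [show pvCategoryMap.items.map Prod.snd = ["fruits", "fruits", "fruits", "fruits", "fruits", "fruits", "fruits", "fruits", "fruits", "fruits", "fruits", "vegetables", "vegetables", "vegetables", "vegetables", "vegetables", "vegetables", "vegetables", "vegetables", "vegetables", "vegetables", "cakes", "cakes", "cakes", "cakes", "cakes", "cakes", "cakes", "cakes", "cakes", "syrups", "syrups", "syrups", "syrups", "syrups", "syrups"] from rfl] at hv
  simp at hv
  tauto

-- pointwise bridge: a category_map lookup returning a category name is the same test as
-- membership in that category's member list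
lemma pvGet?_none (l : List (String × String)) (i : String) (h : ∀ p ∈ l, ¬ p.1 = i) :
    (PySem.Dict.mk l).get? i = none := by
  induction l with
  | nil => rfl
  | cons p t ih =>
    rw [PySem.Dict.get?_mk_cons]
    rw [if_neg (by simpa using h p (List.mem_cons_self))]
    exact ih (fun q hq => h q (List.mem_cons_of_mem _ hq))

set_option maxRecDepth 8192 in
lemma pvLookup_eq_contains (cat : String) (mem : List String)
    (hcm : (cat, mem) ∈ pvMembers) (i : String) :
    (pvCategoryMap.get? i == some cat) = mem.contains i := by
  by_cases hk : i ∈ ["apple", "banana", "strawberry", "mango", "blueberry", "pineapple", "watermelon",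
      "peach", "cherry", "coconut", "avocado", "spinach", "carrot", "beetroot", "kale", "celery",
      "cauliflower", "sweet_potato", "pumpkin", "parsley", "mint", "chocolate", "vanilla", "red_velvet",
      "cheesecake", "lemon", "strawberry_cake", "tiramisu", "black_forest", "coconut_cake", "honey",
      "maple", "chocolate_syrup", "caramel", "vanilla_syrup", "strawberry_syrup"]
  · fin_cases hcm <;> fin_cases hk <;> decide
  · have hnone : pvCategoryMap.get? i = none :=
      pvGet?_none [("apple", "fruits"), ("banana", "fruits"), ("strawberry", "fruits"), ("mango", "fruits"),
        ("blueberry", "fruits"), ("pineapple", "fruits"), ("watermelon", "fruits"), ("peach", "fruits"),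
        ("cherry", "fruits"), ("coconut", "fruits"), ("avocado", "fruits"), ("spinach", "vegetables"),
        ("carrot", "vegetables"), ("beetroot", "vegetables"), ("kale", "vegetables"), ("celery", "vegetables"),
        ("cauliflower", "vegetables"), ("sweet_potato", "vegetables"), ("pumpkin", "vegetables"),
        ("parsley", "vegetables"), ("mint", "vegetables"), ("chocolate", "cakes"), ("vanilla", "cakes"),
        ("red_velvet", "cakes"), ("cheesecake", "cakes"), ("lemon", "cakes"), ("strawberry_cake", "cakes"),
        ("tiramisu", "cakes"), ("black_forest", "cakes"), ("coconut_cake", "cakes"), ("honey", "syrups"),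
        ("maple", "syrups"), ("chocolate_syrup", "syrups"), ("caramel", "syrups"), ("vanilla_syrup", "syrups"),
        ("strawberry_syrup", "syrups")] i
        (by intro p hp hpe; exact hk (by fin_cases hp <;> simp_all))
    have hmem : i ∉ mem := fun hm' => by
      fin_cases hcm <;> exact hk (by fin_cases hm' <;> decide)
    simp [hnone, hmem]

-- loop invariant: folding A's body over ings appends, to each of the four lists, exactly
-- the ingredients whose category_map lookup is that category, in order
lemma pvLoop (ings : List String) (f v c s : List String) :
    (ings.foldl (fun cats ingredient =>
        match pvCategoryMap.get? ingredient with
        | none => cats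
        | some category =>
            if category != "" && cats.contains category then
              cats.modify category [] (fun l => l ++ [ingredient])
            else cats)
      (PySem.Dict.mk [("fruits", f), ("vegetables", v), ("cakes", c), ("syrups", s)])).items
    = [("fruits", f ++ ings.filter (fun i => pvCategoryMap.get? i == some "fruits")),
       ("vegetables", v ++ ings.filter (fun i => pvCategoryMap.get? i == some "vegetables")),
       ("cakes", c ++ ings.filter (fun i => pvCategoryMap.get? i == some "cakes")),
       ("syrups", s ++ ings.filter (fun i => pvCategoryMap.get? i == some "syrups"))] := by
  induction ings generalizing f v c s with
  | nil => simp
  | cons i rest ih =>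
    rcases h : pvCategoryMap.get? i with - | cat
    · simp only [List.foldl_cons, h]
      rw [ih]
      simp [h]
    · rcases pvGet?_cases i cat h with rfl | rfl | rfl | rfl
      · simp only [List.foldl_cons, h]
        rw [show (if ("fruits" != "" && (PySem.Dict.mk [("fruits", f), ("vegetables", v), ("cakes", c), ("syrups", s)]).contains "fruits") = true
               then (PySem.Dict.mk [("fruits", f), ("vegetables", v), ("cakes", c), ("syrups", s)]).modify "fruits" [] (fun l => l ++ [i])
               else PySem.Dict.mk [("fruits", f), ("vegetables", v), ("cakes", c), ("syrups", s)])
              = PySem.Dict.mk [("fruits", f ++ [i]), ("vegetables", v), ("cakes", c), ("syrups", s)] from rfl]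
        rw [ih]
        simp [h]
      · simp only [List.foldl_cons, h]
        rw [show (if ("vegetables" != "" && (PySem.Dict.mk [("fruits", f), ("vegetables", v), ("cakes", c), ("syrups", s)]).contains "vegetables") = true
               then (PySem.Dict.mk [("fruits", f), ("vegetables", v), ("cakes", c), ("syrups", s)]).modify "vegetables" [] (fun l => l ++ [i])
               else PySem.Dict.mk [("fruits", f), ("vegetables", v), ("cakes", c), ("syrups", s)])
              = PySem.Dict.mk [("fruits", f), ("vegetables", v ++ [i]), ("cakes", c), ("syrups", s)] from rfl]
        rw [ih]
        simp [h]
      · simp only [List.foldl_cons, h]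
        rw [show (if ("cakes" != "" && (PySem.Dict.mk [("fruits", f), ("vegetables", v), ("cakes", c), ("syrups", s)]).contains "cakes") = true
               then (PySem.Dict.mk [("fruits", f), ("vegetables", v), ("cakes", c), ("syrups", s)]).modify "cakes" [] (fun l => l ++ [i])
               else PySem.Dict.mk [("fruits", f), ("vegetables", v), ("cakes", c), ("syrups", s)])
              = PySem.Dict.mk [("fruits", f), ("vegetables", v), ("cakes", c ++ [i]), ("syrups", s)] from rfl]
        rw [ih]
        simp [h]
      · simp only [List.foldl_cons, h]
        rw [show (if ("syrups" != "" && (PySem.Dict.mk [("fruits", f), ("vegetables", v), ("cakes", c), ("syrups", s)]).contains "syrups") = true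
               then (PySem.Dict.mk [("fruits", f), ("vegetables", v), ("cakes", c), ("syrups", s)]).modify "syrups" [] (fun l => l ++ [i])
               else PySem.Dict.mk [("fruits", f), ("vegetables", v), ("cakes", c), ("syrups", s)])
              = PySem.Dict.mk [("fruits", f), ("vegetables", v), ("cakes", c), ("syrups", s ++ [i])] from rfl]
        rw [ih]
        simp [h]

-- ===== VERDICT (by name: the statement is the Claim_ definition above) =====
theorem categorize_ingredients_py_spec : Claim_equal_categorize_ingredients_py := by
  intro ingredients _
  unfold Spec_categorize_ingredients_py categorize_ingredients_py categorize_ingredients_py_alt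
  rw [show (PySem.Dict.ofList [("fruits", ([] : List String)), ("vegetables", []), ("cakes", []), ("syrups", [])])
        = PySem.Dict.mk [("fruits", []), ("vegetables", []), ("cakes", []), ("syrups", [])] from rfl,
     pvLoop]
  simp only [pvMembers, List.map]
  rw [List.filter_congr (fun i _ => pvLookup_eq_contains "fruits" ["apple", "banana", "strawberry", "mango", "blueberry", "pineapple", "watermelon", "peach", "cherry", "coconut", "avocado"] (by decide) i),
      List.filter_congr (fun i _ => pvLookup_eq_contains "vegetables" ["spinach", "carrot", "beetroot", "kale", "celery", "cauliflower", "sweet_potato", "pumpkin", "parsley", "mint"] (by decide) i),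
      List.filter_congr (fun i _ => pvLookup_eq_contains "cakes" ["chocolate", "vanilla", "red_velvet", "cheesecake", "lemon", "strawberry_cake", "tiramisu", "black_forest", "coconut_cake"] (by decide) i),
      List.filter_congr (fun i _ => pvLookup_eq_contains "syrups" ["honey", "maple", "chocolate_syrup", "caramel", "vanilla_syrup", "strawberry_syrup"] (by decide) i)]
  simp only [List.nil_append]
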